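-- pv_equiv track=rewrite | github.com/echen1668/451Code | NFAandDFA.py | automatonM3
-- ===== SOURCE A (Python) =====
-- def automatonM3(InputString): #function for M3
--     EndState = 'q0' #start state
--     for i in InputString:
--         #Transition function
--         if EndState == 'q0' and i == '0':
--             EndState = 'q0'
--         elif EndState == 'q0' and i == '1':
--             EndState = 'q1'
--         elif EndState == 'q1' and i == '0':
--             EndState = 'q1'
--         elif EndState == 'q1' and i == '1':
--             EndState = 'q0'
--     if EndState in ['q0']:
--         AcceptFlag = True
--     else:
--         AcceptFlag = False
--     return AcceptFlag, EndState
-- ===== SOURCE B (Python) =====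
-- def automatonM3(InputString):
--     ones = InputString.count('1')
--     EndState = 'q0' if ones % 2 == 0 else 'q1'
--     return EndState == 'q0', EndState
-- ===== Notes on version B (the rewrite author's own statement) =====
-- stated objective: simpler
-- what changed: Replaced the explicit DFA state-transition loop with a direct parity computation: count the '1' characters once with str.count and pick the end state from the count's parity (the counting runs in C instead of a Python-level loop).
import Mathlib
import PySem

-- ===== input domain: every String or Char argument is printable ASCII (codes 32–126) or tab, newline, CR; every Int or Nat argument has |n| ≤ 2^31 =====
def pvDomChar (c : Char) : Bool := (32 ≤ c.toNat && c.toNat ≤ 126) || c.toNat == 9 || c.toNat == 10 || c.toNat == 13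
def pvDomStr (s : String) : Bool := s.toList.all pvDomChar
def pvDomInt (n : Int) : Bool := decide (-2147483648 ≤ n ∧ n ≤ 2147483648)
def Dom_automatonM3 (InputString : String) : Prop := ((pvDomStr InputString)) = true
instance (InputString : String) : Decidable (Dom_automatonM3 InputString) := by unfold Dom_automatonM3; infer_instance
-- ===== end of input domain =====

-- B replaces A's explicit DFA transition loop by counting the '1' characters and deriving the end state from the count's parity (simpler).


-- ===== PORT A =====
-- literal transliteration of A's loop body (the four transition branches, in order)
def stepA (EndState : String) (i : Char) : String :=
  if EndState == "q0" && i == '0' then "q0"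
  else if EndState == "q0" && i == '1' then "q1"
  else if EndState == "q1" && i == '0' then "q1"
  else if EndState == "q1" && i == '1' then "q0"
  else EndState

def automatonM3 (InputString : String) : Bool × String :=
  let EndState := InputString.toList.foldl stepA "q0"
  let AcceptFlag := EndState ∈ ["q0"]
  (AcceptFlag, EndState)

-- ===== PORT B =====
def automatonM3_alt (InputString : String) : Bool × String :=
  let ones := PySem.Str.count InputString "1"
  let EndState := if ones % 2 == 0 then "q0" else "q1"
  (EndState == "q0", EndState)

-- ===== PRECONDITION & SPEC =====
def Spec_automatonM3 (InputString : String) (out : Bool × String) : Prop := out = automatonM3_alt InputString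
instance (InputString : String) (out : Bool × String) : Decidable (Spec_automatonM3 InputString out) := by unfold Spec_automatonM3; infer_instance

-- ===== CLAIM (what is proved, stated in full; the proofs are below) =====
def Claim_equal_automatonM3 : Prop := ∀ (InputString : String), Dom_automatonM3 InputString → Spec_automatonM3 InputString (automatonM3 InputString)

-- ===== LEMMAS AND PROOFS =====

-- s.count('1') on a single-character pattern counts the '1' characters
theorem count_go_singleton (l : List Char) : ∀ (fuel acc : Nat), l.length ≤ fuel →
    PySem.Chars.count.go ['1'] fuel l acc = acc + l.count '1' := by
  induction l with
  | nil => intro fuel acc _; cases fuel <;> simp [PySem.Chars.count.go]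
  | cons h t ih =>
    intro fuel acc hle
    cases fuel with
    | zero => simp at hle
    | succ n =>
      simp only [PySem.Chars.count.go]
      by_cases hh : h = '1'
      · subst hh
        rw [if_pos (by simp [List.isPrefixOf])]
        simp only [List.length_singleton, List.drop_succ_cons, List.drop_zero]
        rw [ih n (acc + 1) (by simpa using hle)]
        simp
        omega
      · have hnp : ¬ (List.isPrefixOf ['1'] (h :: t) = true) := by
          simp [List.isPrefixOf]
          exact fun hc => hh hc.symm
        rw [if_neg hnp, ih n acc (by simpa using hle)]
        simp [hh]

theorem chars_count_one (cs : List Char) : PySem.Chars.count cs ['1'] = cs.count '1' := by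
  simp only [PySem.Chars.count, List.isEmpty]
  rw [if_neg (by decide)]
  rw [count_go_singleton cs cs.length 0 le_rfl]
  omega

-- A's fold invariant: the state is "q0"/"q1" according to the parity of '1's seen so far
theorem foldA_parity (l : List Char) : ∀ s : String, s = "q0" ∨ s = "q1" →
    l.foldl stepA s =
    (if (l.count '1' + (if s = "q1" then 1 else 0)) % 2 = 0 then "q0" else "q1") := by
  induction l with
  | nil =>
    rintro s (rfl | rfl) <;> simp
  | cons h t ih =>
    rintro s hs
    by_cases hh : h = '1'
    · subst hh
      rcases hs with rfl | rfl
      · rw [List.foldl_cons, show stepA "q0" '1' = "q1" from rfl, ih "q1" (Or.inr rfl)]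
        by_cases hp : t.count '1' % 2 = 0 <;> simp [Nat.add_mod, hp]
      · rw [List.foldl_cons, show stepA "q1" '1' = "q0" from rfl, ih "q0" (Or.inl rfl)]
        by_cases hp : t.count '1' % 2 = 0
        · simp [Nat.add_mod, hp]
        · simp [Nat.add_mod, hp]; omega
    · have step : stepA s h = s := by
        rcases hs with rfl | rfl <;> by_cases h0 : h = '0' <;> simp [stepA, h0, hh]
      rw [List.foldl_cons, step, ih s hs]
      simp [hh]

-- ===== VERDICT (by name: the statement is the Claim_ definition above) =====
theorem automatonM3_spec : Claim_equal_automatonM3 := by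
  intro s _
  unfold Spec_automatonM3 automatonM3 automatonM3_alt
  simp only [PySem.Str.count_eq, show ("1" : String).toList = ['1'] from rfl, chars_count_one]
  rw [foldA_parity s.toList "q0" (Or.inl rfl)]
  simp only [if_neg (by decide : ¬ ("q0" : String) = "q1"), add_zero]
  by_cases hp : s.toList.count '1' % 2 = 0 <;> simp [hp]
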